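-- pv_equiv track=rewrite | github.com/surge-ai/tau-bench | tau_bench/envs/worldbench_corecraft_computers/variations/variation_1/tools/tau_sqlite_utils.py | _to_sql_table_name
-- ===== SOURCE A (Python) =====
-- def _to_sql_table_name(key: str) -> str:
--     """Convert data key to SQL table name.
--
--     Maps lowercase/snake_case keys to capitalized table names expected by SQL queries.
--     Examples:
--         "order" -> "Order"
--         "payment" -> "Payment"
--         "support_ticket" -> "SupportTicket"
--         "customer" -> "Customer"
--     """
--     # Map known keys to their SQL table names (matching what SQL queries expect)
--     table_name_map = {
--         "order": "Order",
--         "payment": "Payment",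
--         "product": "Product",
--         "customer": "Customer",
--         "support_ticket": "SupportTicket",
--         "shipment": "Shipment",
--         "build": "Build",
--         "refund": "Refund",
--         "resolution": "Resolution",
--         "escalation": "Escalation",
--         "bundle": "Bundle",
--         "compatibility_rule": "CompatibilityRule",
--         "employee": "Employee",
--         "knowledge_base_article": "KnowledgeBaseArticle",
--         "linkedin_profile": "LinkedInProfile",
--         "slack_channel": "SlackChannel",
--         "slack_message": "SlackMessage",
--     }
--
--     # Check if we have a mapping
--     if key in table_name_map:
--         return table_name_map[key]
--
--     # Otherwise, capitalize first letter and convert snake_case to CamelCase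
--     parts = key.split("_")
--     return "".join(part.capitalize() for part in parts)
-- ===== SOURCE B (Python) =====
-- # B: single character-level pass with a capitalize-next flag (no dict, no split/join);
-- # the one irregular name is returned by an early equality check.
-- def _to_sql_table_name(key: str) -> str:
--     if key == "linkedin_profile":
--         return "LinkedInProfile"
--     out = []
--     start = True
--     for ch in key:
--         if ch == "_":
--             start = True
--         else:
--             out.append(ch.upper() if start else ch.lower())
--             start = False
--     return "".join(out)
-- ===== Notes on version B (the rewrite author's own statement) =====
-- stated objective: simpler
-- what changed: B replaces A's 17-entry dispatch dict and split/capitalize/join pipeline with a single character-level pass carrying a capitalize-next flag, plus one early equality check for the sole irregular brand-cased key.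
import Mathlib
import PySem

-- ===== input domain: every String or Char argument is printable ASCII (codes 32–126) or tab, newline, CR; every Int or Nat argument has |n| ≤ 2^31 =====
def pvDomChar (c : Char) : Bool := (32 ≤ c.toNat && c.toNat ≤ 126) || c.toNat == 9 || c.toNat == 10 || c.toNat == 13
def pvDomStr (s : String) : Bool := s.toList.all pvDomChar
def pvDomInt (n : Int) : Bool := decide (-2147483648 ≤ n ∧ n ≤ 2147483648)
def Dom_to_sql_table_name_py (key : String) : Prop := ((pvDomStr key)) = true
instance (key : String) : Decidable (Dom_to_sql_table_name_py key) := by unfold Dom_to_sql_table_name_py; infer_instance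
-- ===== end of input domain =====

-- B replaces A's dispatch dict and split/capitalize/join pipeline with a single character-level
-- pass carrying a capitalize-next flag (plus one equality check for the irregular brand-cased key); same values.

-- ===== PORT A =====
-- part.capitalize(): first char upper-cased, rest lower-cased — exact on the ASCII domain
-- (PySem has no capitalize primitive; ported by hand, step for step).
def pyCapitalize : List Char → List Char
  | [] => []
  | c :: rest => PySem.Chars.upperChar c :: PySem.Chars.lower rest

-- "".join(part.capitalize() for part in key.split("_"))
def snakeToCamel (key : String) : String :=
  String.ofList (PySem.Chars.join [] ((PySem.Chars.splitOn key.toList ['_']).map pyCapitalize))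

def pvTableNameMap : PySem.Dict String String :=
  PySem.Dict.ofList
    [("order", "Order"), ("payment", "Payment"), ("product", "Product"),
     ("customer", "Customer"), ("support_ticket", "SupportTicket"),
     ("shipment", "Shipment"), ("build", "Build"), ("refund", "Refund"),
     ("resolution", "Resolution"), ("escalation", "Escalation"),
     ("bundle", "Bundle"), ("compatibility_rule", "CompatibilityRule"),
     ("employee", "Employee"), ("knowledge_base_article", "KnowledgeBaseArticle"),
     ("linkedin_profile", "LinkedInProfile"), ("slack_channel", "SlackChannel"),
     ("slack_message", "SlackMessage")]

def to_sql_table_name_py (key : String) : String :=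
  match pvTableNameMap.get? key with
  | some v => v
  | none => snakeToCamel key

-- ===== PORT B =====
-- the loop body of Source B's for-loop: state = (out, start)
def camelStep (st : List Char × Bool) (ch : Char) : List Char × Bool :=
  if ch = '_' then (st.1, true)
  else (st.1 ++ [if st.2 then PySem.Chars.upperChar ch else PySem.Chars.lowerChar ch], false)

def to_sql_table_name_py_alt (key : String) : String :=
  if key = "linkedin_profile" then "LinkedInProfile"
  else String.ofList (key.toList.foldl camelStep ([], true)).1

-- ===== PRECONDITION & SPEC =====
def Spec_to_sql_table_name_py (key : String) (out : String) : Prop := out = to_sql_table_name_py_alt key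
instance (key : String) (out : String) : Decidable (Spec_to_sql_table_name_py key out) := by unfold Spec_to_sql_table_name_py; infer_instance

-- ===== CLAIM =====
def Claim_equal_to_sql_table_name_py : Prop := ∀ (key : String), Dom_to_sql_table_name_py key → Spec_to_sql_table_name_py key (to_sql_table_name_py key)

-- ===== LEMMAS AND PROOFS =====

-- recursive characterisation of key.split("_") for the one-character separator
def splits : List Char → List (List Char)
  | [] => [[]]
  | c :: rest =>
    if c = '_' then [] :: splits rest
    else
      match splits rest with
      | [] => [[c]]
      | p :: ps => (c :: p) :: ps

-- prepend to the head piece (the accumulator shape of splitOn.go)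
def consHead (pre : List Char) : List (List Char) → List (List Char)
  | [] => [pre]
  | p :: ps => (pre ++ p) :: ps

lemma splits_ne_nil (cs : List Char) : splits cs ≠ [] := by
  cases cs with
  | nil => simp [splits]
  | cons c rest =>
    simp only [splits]
    split_ifs
    · simp
    · cases h : splits rest <;> simp

lemma go_eq (fuel : Nat) : ∀ (l cur : List Char) (accs : List (List Char)),
    l.length < fuel →
    PySem.Chars.splitOn.go ['_'] fuel l cur accs = accs.reverse ++ consHead cur.reverse (splits l) := by
  induction fuel with
  | zero => intro l cur accs h; omega
  | succ f ih =>
    intro l cur accs h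
    cases l with
    | nil =>
      simp [PySem.Chars.splitOn.go, splits, consHead]
    | cons c rest =>
      rw [PySem.Chars.splitOn.go]
      by_cases hc : c = '_'
      · subst hc
        simp only [List.isPrefixOf, BEq.rfl, Bool.true_and, if_true,
          List.length_cons, List.drop_succ_cons, List.length_nil, List.drop_zero]
        rw [ih rest [] (cur.reverse :: accs) (by simp at h; omega)]
        simp [splits, consHead]
        cases hsr : splits rest with
        | nil => exact absurd hsr (splits_ne_nil rest)
        | cons q qs => simp
      · have hpf : (['_'].isPrefixOf (c :: rest)) = false := by
          simp [List.isPrefixOf]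
          intro hcontr; exact hc hcontr.symm
        simp only [hpf, Bool.false_eq_true, if_false]
        rw [ih rest (c :: cur) accs (by simp at h ⊢; omega)]
        have hne := splits_ne_nil rest
        cases hs : splits rest with
        | nil => exact absurd hs hne
        | cons p ps => simp [splits, hc, hs, consHead]

lemma splitOn_eq_splits (cs : List Char) : PySem.Chars.splitOn cs ['_'] = splits cs := by
  unfold PySem.Chars.splitOn
  rw [go_eq (cs.length + 1) cs [] [] (by omega)]
  have hne := splits_ne_nil cs
  cases hs : splits cs with
  | nil => exact absurd hs hne
  | cons p ps => simp [consHead]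

-- reference recursion for Source B's loop
def camelGo : Bool → List Char → List Char
  | _, [] => []
  | flag, c :: rest =>
    if c = '_' then camelGo true rest
    else (if flag then PySem.Chars.upperChar c else PySem.Chars.lowerChar c) :: camelGo false rest

lemma foldl_camelStep (cs : List Char) : ∀ (acc : List Char) (flag : Bool),
    (cs.foldl camelStep (acc, flag)).1 = acc ++ camelGo flag cs := by
  induction cs with
  | nil => intro acc flag; simp [camelGo]
  | cons c rest ih =>
    intro acc flag
    by_cases hc : c = '_'
    · subst hc; simp [camelStep, camelGo, ih]
    · simp [camelStep, camelGo, hc, ih]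

lemma camel_spec (cs : List Char) : ∀ (p : List Char) (ps : List (List Char)),
    splits cs = p :: ps →
    camelGo true cs = ((p :: ps).map pyCapitalize).flatten ∧
    camelGo false cs = PySem.Chars.lower p ++ (ps.map pyCapitalize).flatten := by
  induction cs with
  | nil =>
    intro p ps h
    simp [splits] at h
    obtain ⟨hp, hps⟩ := h
    subst hp; subst hps
    simp [camelGo, pyCapitalize, PySem.Chars.lower]
  | cons c rest ih =>
    intro p ps h
    have hne := splits_ne_nil rest
    cases hs : splits rest with
    | nil => exact absurd hs hne
    | cons q qs =>
      by_cases hc : c = '_'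
      · subst hc
        simp [splits, hs] at h
        obtain ⟨hp, hps⟩ := h
        subst hp; subst hps
        have := (ih q qs hs).1
        constructor
        · simp [camelGo, this, pyCapitalize]
        · simp [camelGo, this, PySem.Chars.lower, pyCapitalize]
      · simp [splits, hc, hs] at h
        obtain ⟨hp, hps⟩ := h
        subst hp; subst hps
        have hfalse := (ih q qs hs).2
        constructor
        · simp [camelGo, hc, hfalse, pyCapitalize]
        · simp [camelGo, hc, hfalse, PySem.Chars.lower]

lemma join_nil_flatten (ps : List (List Char)) : PySem.Chars.join [] ps = ps.flatten := by
  induction ps with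
  | nil => rfl
  | cons p t ih =>
    cases t with
    | nil => simp [PySem.Chars.join, List.intercalate]
    | cons q r =>
      rw [PySem.Chars.join_cons_cons] at *
      simp [ih]

-- on any key the computed transforms of A and B agree
lemma snake_eq_camel (key : String) :
    snakeToCamel key = String.ofList (key.toList.foldl camelStep ([], true)).1 := by
  have hne := splits_ne_nil key.toList
  cases hs : splits key.toList with
  | nil => exact absurd hs hne
  | cons p ps =>
    have h1 := (camel_spec key.toList p ps hs).1
    rw [snakeToCamel, splitOn_eq_splits, hs, foldl_camelStep, List.nil_append, h1,
      join_nil_flatten]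

-- ===== VERDICT =====
theorem to_sql_table_name_py_spec : Claim_equal_to_sql_table_name_py := by
  intro key _
  unfold Spec_to_sql_table_name_py to_sql_table_name_py to_sql_table_name_py_alt
  by_cases h1 : key = "order"; · subst h1; decide
  by_cases h2 : key = "payment"; · subst h2; decide
  by_cases h3 : key = "product"; · subst h3; decide
  by_cases h4 : key = "customer"; · subst h4; decide
  by_cases h5 : key = "support_ticket"; · subst h5; decide
  by_cases h6 : key = "shipment"; · subst h6; decide
  by_cases h7 : key = "build"; · subst h7; decide
  by_cases h8 : key = "refund"; · subst h8; decide
  by_cases h9 : key = "resolution"; · subst h9; decide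
  by_cases h10 : key = "escalation"; · subst h10; decide
  by_cases h11 : key = "bundle"; · subst h11; decide
  by_cases h12 : key = "compatibility_rule"; · subst h12; decide
  by_cases h13 : key = "employee"; · subst h13; decide
  by_cases h14 : key = "knowledge_base_article"; · subst h14; decide
  by_cases h15 : key = "linkedin_profile"; · subst h15; decide
  by_cases h16 : key = "slack_channel"; · subst h16; decide
  by_cases h17 : key = "slack_message"; · subst h17; decide
  have hA : pvTableNameMap.items =
      [("order", "Order"), ("payment", "Payment"), ("product", "Product"),
       ("customer", "Customer"), ("support_ticket", "SupportTicket"),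
       ("shipment", "Shipment"), ("build", "Build"), ("refund", "Refund"),
       ("resolution", "Resolution"), ("escalation", "Escalation"),
       ("bundle", "Bundle"), ("compatibility_rule", "CompatibilityRule"),
       ("employee", "Employee"), ("knowledge_base_article", "KnowledgeBaseArticle"),
       ("linkedin_profile", "LinkedInProfile"), ("slack_channel", "SlackChannel"),
       ("slack_message", "SlackMessage")] := by rfl
  simp only [PySem.Dict.get?, hA]
  simp [Ne.symm h1, Ne.symm h2, Ne.symm h3, Ne.symm h4,
        Ne.symm h5, Ne.symm h6, Ne.symm h7, Ne.symm h8, Ne.symm h9, Ne.symm h10,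
        Ne.symm h11, Ne.symm h12, Ne.symm h13, Ne.symm h14, Ne.symm h15,
        Ne.symm h16, Ne.symm h17, h15, snake_eq_camel key]
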